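-- pv_equiv track=rewrite | github.com/sanshanchuns/economist | split_pdf_to_markdown.py | _preserve_intra_paragraph_linebreaks
-- ===== SOURCE A (Python) =====
-- def _preserve_intra_paragraph_linebreaks(md_text: str) -> str:
--     # 合并段内的软换行，只保留真正的段落分隔
--     lines = md_text.splitlines()
--     if not lines:
--         return md_text
--
--     # 调试输出已移除
--
--     result_lines = []
--     current_paragraph = []
--
--     for i, line in enumerate(lines):
--         stripped = line.strip()
--
--         # 处理特殊行：HTML 注释、标题、图片、列表、HTML 标签行
--         if (not stripped) or stripped.startswith("<!--") or stripped.startswith("#") \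
--            or stripped.startswith("!") or stripped.startswith("-") or stripped.startswith("<") \
--            or stripped.startswith("**Images**"):
--             # 如果当前段落有内容，先输出当前段落
--             if current_paragraph:
--                 result_lines.append(" ".join(current_paragraph))
--                 current_paragraph = []
--             # 输出特殊行
--             result_lines.append(line)
--             continue
--
--         # 如果是空行，表示段落结束
--         if not stripped:
--             if current_paragraph:
--                 result_lines.append(" ".join(current_paragraph))
--                 current_paragraph = []
--             result_lines.append("")  # 保留空行
--             continue
--
--         # 标题的合并现在由 _detect_header_candidates 函数处理，这里不再处理
--
--         # 将当前行添加到当前段落（只处理正文）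
--         current_paragraph.append(stripped)
--
--     # 处理最后一个段落
--     if current_paragraph:
--         result_lines.append(" ".join(current_paragraph))
--
--     return "\n".join(result_lines)
-- ===== SOURCE B (Python) =====
-- def _preserve_intra_paragraph_linebreaks(md_text: str) -> str:
--     # Pairwise-separator formulation: render each line independently (body lines
--     # stripped, special lines verbatim), then decide every separator locally from
--     # the pair of adjacent lines: ' ' iff both are body lines, else '\n'.
--     # No paragraph buffer, no flushing, no run-consuming loop.
--     lines = md_text.splitlines()
--     if not lines:
--         return md_text
--
--     def is_body(line):
--         s = line.strip()
--         return bool(s) and s[0] not in '<#!-' and not s.startswith('**Images**')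
--
--     def render(line):
--         return line.strip() if is_body(line) else line
--
--     parts = [render(lines[0])]
--     for prev, cur in zip(lines, lines[1:]):
--         parts.append(' ' if is_body(prev) and is_body(cur) else '\n')
--         parts.append(render(cur))
--     return ''.join(parts)
-- ===== Notes on version B (the rewrite author's own statement) =====
-- stated objective: alternative
-- what changed: Replaces A's stateful single pass (accumulate body lines in current_paragraph, flush it at each special line and once more at the end) by a stateless pairwise-separator formulation: every line is rendered independently (body lines stripped, special lines verbatim) and each separator between adjacent lines is decided locally from that pair alone (' ' iff both are body lines, else '\n'), so there is no paragraph buffer and no flushing at all.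
import Mathlib
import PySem

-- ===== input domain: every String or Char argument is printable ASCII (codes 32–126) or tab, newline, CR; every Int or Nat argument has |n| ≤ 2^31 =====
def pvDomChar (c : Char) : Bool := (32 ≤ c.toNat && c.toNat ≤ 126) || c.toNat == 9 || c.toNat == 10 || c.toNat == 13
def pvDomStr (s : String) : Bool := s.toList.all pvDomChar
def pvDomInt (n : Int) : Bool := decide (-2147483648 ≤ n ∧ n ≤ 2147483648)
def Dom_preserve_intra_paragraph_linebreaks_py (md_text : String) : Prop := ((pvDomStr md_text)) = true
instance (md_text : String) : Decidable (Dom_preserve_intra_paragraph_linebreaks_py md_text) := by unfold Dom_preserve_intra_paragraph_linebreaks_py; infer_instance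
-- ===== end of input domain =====

-- B replaces A's stateful paragraph buffer (accumulate body lines, flush at each special
-- line and at the end) by a stateless pairwise-separator formulation: every line is
-- rendered once on its own, and each separator is decided locally from the adjacent
-- pair of lines (objective: alternative decomposition, same O(n) cost).

-- ===== PORT A =====
-- one step of A's for-loop; state = (result_lines, current_paragraph)
def pvAStep (st : List String × List String) (line : String) : List String × List String :=
  let result_lines := st.1
  let current_paragraph := st.2
  let stripped := PySem.Str.strip line
  if stripped == "" || PySem.Str.startswith stripped "<!--" || PySem.Str.startswith stripped "#"
      || PySem.Str.startswith stripped "!" || PySem.Str.startswith stripped "-"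
      || PySem.Str.startswith stripped "<" || PySem.Str.startswith stripped "**Images**" then
    let result_lines :=
      if current_paragraph.isEmpty then result_lines
      else result_lines ++ [PySem.Str.join " " current_paragraph]
    (result_lines ++ [line], [])
  else if stripped == "" then
    -- A's (unreachable) empty-line branch, transliterated
    let result_lines :=
      if current_paragraph.isEmpty then result_lines
      else result_lines ++ [PySem.Str.join " " current_paragraph]
    (result_lines ++ [""], [])
  else
    (result_lines, current_paragraph ++ [stripped])

def preserve_intra_paragraph_linebreaks_py (md_text : String) : String :=
  let lines := PySem.Str.splitlines md_text
  if lines.isEmpty then md_text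
  else
    let st := lines.foldl pvAStep ([], [])
    let result_lines :=
      if st.2.isEmpty then st.1 else st.1 ++ [PySem.Str.join " " st.2]
    PySem.Str.join "\n" result_lines

-- ===== PORT B =====
-- Source B's is_body(line): bool(s) and s[0] not in '<#!-' and not s.startswith('**Images**')
-- (the [] match arm is unreachable: Python short-circuits on bool(s) before reading s[0])
def pvBody (line : String) : Bool :=
  let s := PySem.Str.strip line
  (!(s == "")) &&
  (match s.toList with
   | c :: _ => !(c == '<' || c == '#' || c == '!' || c == '-')
   | [] => true) &&
  (!(PySem.Str.startswith s "**Images**"))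

-- Source B's render(line)
def pvRender (line : String) : String :=
  if pvBody line then PySem.Str.strip line else line

def preserve_intra_paragraph_linebreaks_py_alt (md_text : String) : String :=
  let lines := PySem.Str.splitlines md_text
  if lines.isEmpty then md_text
  else
    let parts := (lines.zip lines.tail).foldl
      (fun acc pc => acc ++ [(if pvBody pc.1 && pvBody pc.2 then " " else "\n"), pvRender pc.2])
      [pvRender (lines.headD "")]
    PySem.Str.join "" parts

-- ===== PRECONDITION & SPEC =====
def Spec_preserve_intra_paragraph_linebreaks_py (md_text : String) (out : String) : Prop := out = preserve_intra_paragraph_linebreaks_py_alt md_text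
instance (md_text : String) (out : String) : Decidable (Spec_preserve_intra_paragraph_linebreaks_py md_text out) := by unfold Spec_preserve_intra_paragraph_linebreaks_py; infer_instance

-- ===== CLAIM (what is proved, stated in full; the proofs are below) =====
def Claim_equal_preserve_intra_paragraph_linebreaks_py : Prop := ∀ (md_text : String), Dom_preserve_intra_paragraph_linebreaks_py md_text → Spec_preserve_intra_paragraph_linebreaks_py md_text (preserve_intra_paragraph_linebreaks_py md_text)

-- ===== LEMMAS AND PROOFS =====

-- A's special-line predicate, factored (proof device)
def pvIsSpecial (s : String) : Bool :=
  s == "" ||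
  (match s.toList with
   | c :: _ => c == '<' || c == '#' || c == '!' || c == '-'
   | [] => false) ||
  PySem.Str.startswith s "**Images**"

-- A's special-line test equals pvIsSpecial on every string
theorem pvSpecial_eq (s : String) :
    (s == "" || PySem.Str.startswith s "<!--" || PySem.Str.startswith s "#"
      || PySem.Str.startswith s "!" || PySem.Str.startswith s "-"
      || PySem.Str.startswith s "<" || PySem.Str.startswith s "**Images**")
      = pvIsSpecial s := by
  unfold pvIsSpecial
  simp only [PySem.Str.startswith_eq]
  cases h : s.toList with
  | nil => simp [PySem.Chars.startswith]
  | cons c l =>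
    have hne : (s == "") = false := by
      rw [beq_eq_false_iff_ne]
      intro e; subst e; simp at h
    rw [hne]
    simp only [Bool.false_or,
      show "<!--".toList = ['<','!','-','-'] from rfl,
      show "#".toList = ['#'] from rfl,
      show "!".toList = ['!'] from rfl,
      show "-".toList = ['-'] from rfl,
      show "<".toList = ['<'] from rfl,
      show "**Images**".toList = ['*','*','I','m','a','g','e','s','*','*'] from rfl,
      PySem.Chars.startswith, List.isPrefixOf]
    rw [Bool.eq_iff_iff]
    simp only [Bool.or_eq_true, Bool.and_eq_true, beq_iff_eq]
    constructor
    · rintro (((((⟨rfl, hp⟩ | ⟨rfl, _⟩) | ⟨rfl, _⟩) | ⟨rfl, _⟩) | ⟨rfl, _⟩) | h) <;> tauto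
    · rintro ((((rfl | rfl) | rfl) | rfl) | h) <;> tauto

-- Source B's is_body is the negation of A's special-line predicate
theorem pvBody_eq (line : String) : pvBody line = !pvIsSpecial (PySem.Str.strip line) := by
  unfold pvBody pvIsSpecial
  set s := PySem.Str.strip line with hs
  by_cases he : (s == "") = true
  · simp [he]
  · have he' : (s == "") = false := by revert he; cases s == "" <;> simp
    cases h : s.toList with
    | nil => simp [he', h]
    | cons c l => simp [he', h, Bool.not_or]

-- collect the stripped lines of the leading body run, return the rest (proof device)
def pvTakeBody (ls : List String) : List String × List String :=
  match ls with
  | [] => ([], [])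
  | l :: rest =>
    if pvIsSpecial (PySem.Str.strip l) then ([], l :: rest)
    else
      let pr := pvTakeBody rest
      (PySem.Str.strip l :: pr.1, pr.2)

theorem pvTakeBody_snd_length_le (ls : List String) : (pvTakeBody ls).2.length ≤ ls.length := by
  induction ls with
  | nil => simp [pvTakeBody]
  | cons l rest ih =>
    simp only [pvTakeBody]
    split
    · simp
    · simpa using Nat.le_succ_of_le ih

-- run-grouped rendering of a line list (proof device relating both ports)
def pvBGo (ls : List String) : List String :=
  match ls with
  | [] => []
  | l :: rest =>
    if pvIsSpecial (PySem.Str.strip l) then l :: pvBGo rest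
    else
      let pr := pvTakeBody (l :: rest)
      PySem.Str.join " " pr.1 :: pvBGo pr.2
termination_by ls.length
decreasing_by
  · simp
  · simp only [pvTakeBody, if_neg (by assumption)]
    exact Nat.lt_succ_of_le (pvTakeBody_snd_length_le rest)

theorem pvBGo_ne_nil (l : String) (rest : List String) : pvBGo (l :: rest) ≠ [] := by
  unfold pvBGo; split <;> simp

-- pvBGo with a pending paragraph cur (proof device relating A's fold to pvBGo)
def pvBump (cur : List String) (ls : List String) : List String :=
  match ls with
  | [] => if cur.isEmpty then [] else [PySem.Str.join " " cur]
  | l :: rest =>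
    if pvIsSpecial (PySem.Str.strip l) then
      (if cur.isEmpty then [] else [PySem.Str.join " " cur]) ++ l :: pvBGo rest
    else pvBump (cur ++ [PySem.Str.strip l]) rest

theorem pvBump_run (ls : List String) : ∀ cur : List String,
    pvBump cur ls =
      (if (cur ++ (pvTakeBody ls).1).isEmpty then [] else [PySem.Str.join " " (cur ++ (pvTakeBody ls).1)])
        ++ pvBGo (pvTakeBody ls).2 := by
  induction ls with
  | nil => intro cur; simp [pvBump, pvTakeBody, pvBGo]
  | cons l rest ih =>
    intro cur
    by_cases hsp : pvIsSpecial (PySem.Str.strip l) = true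
    · simp [pvBump, pvTakeBody, hsp, pvBGo]
    · simp only [pvBump, pvTakeBody, hsp, Bool.false_eq_true, if_false]
      rw [ih (cur ++ [PySem.Str.strip l])]
      simp

theorem pvBGo_eq_bump (ls : List String) : pvBGo ls = pvBump [] ls := by
  rw [pvBump_run]
  cases ls with
  | nil => simp [pvBGo, pvTakeBody]
  | cons l rest =>
    by_cases hsp : pvIsSpecial (PySem.Str.strip l) = true
    · simp [pvTakeBody, hsp, pvBGo]
    · simp [pvTakeBody, hsp, pvBGo]

theorem pvFold_bump (ls : List String) : ∀ res cur : List String,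
    (let st := ls.foldl pvAStep (res, cur)
     if st.2.isEmpty then st.1 else st.1 ++ [PySem.Str.join " " st.2])
      = res ++ pvBump cur ls := by
  induction ls with
  | nil =>
    intro res cur
    simp only [List.foldl_nil, pvBump]
    split <;> simp
  | cons l rest ih =>
    intro res cur
    simp only [List.foldl_cons]
    rw [show pvAStep (res, cur) l =
        (if pvIsSpecial (PySem.Str.strip l) then
          ((if cur.isEmpty then res else res ++ [PySem.Str.join " " cur]) ++ [l], ([] : List String))
         else (res, cur ++ [PySem.Str.strip l])) from by
      simp only [pvAStep]
      rw [pvSpecial_eq (PySem.Str.strip l)]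
      by_cases hsp : pvIsSpecial (PySem.Str.strip l) = true
      · simp [hsp]
      · have hne : (PySem.Str.strip l == "") = false := by
          revert hsp; unfold pvIsSpecial; cases PySem.Str.strip l == "" <;> simp
        simp [hsp, hne]]
    by_cases hsp : pvIsSpecial (PySem.Str.strip l) = true
    · rw [if_pos hsp, ih]
      simp only [pvBump, hsp, if_pos]
      rw [← pvBGo_eq_bump]
      split <;> simp
    · rw [if_neg hsp, ih]
      simp [pvBump, hsp]

-- B's output at the character level: piece of each line plus its locally decided separator
def pvOutL : String → List String → List Char
  | _, [] => []
  | p, c :: r =>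
      (if pvBody p && pvBody c then " " else "\n").toList ++ (pvRender c).toList ++ pvOutL c r

-- ''.join is concatenation
theorem pvJoin_nil (L : List (List Char)) : PySem.Chars.join ("".toList) L = L.flatten := by
  induction L with
  | nil => simp [PySem.Chars.join_nil]
  | cons a L ih =>
    cases L with
    | nil => simp [PySem.Chars.join_singleton]
    | cons b M =>
      rw [PySem.Chars.join_cons_cons, ih]
      simp

-- ' '.join over a snoc, at the character level
theorem pvJoinSnocL (sep y : List Char) (xs : List (List Char)) (h : xs ≠ []) :
    PySem.Chars.join sep (xs ++ [y]) = PySem.Chars.join sep xs ++ sep ++ y := by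
  induction xs with
  | nil => exact absurd rfl h
  | cons x xs ih =>
    cases xs with
    | nil => simp [PySem.Chars.join_cons_cons, PySem.Chars.join_singleton]
    | cons x' xs' =>
      calc PySem.Chars.join sep ((x :: x' :: xs') ++ [y])
          = x ++ sep ++ PySem.Chars.join sep (x' :: (xs' ++ [y])) := by
            rw [List.cons_append, List.cons_append, PySem.Chars.join_cons_cons]
        _ = x ++ sep ++ (PySem.Chars.join sep (x' :: xs') ++ sep ++ y) := by
            rw [← List.cons_append, ih (by simp)]
        _ = PySem.Chars.join sep (x :: x' :: xs') ++ sep ++ y := by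
            rw [PySem.Chars.join_cons_cons]
            simp [List.append_assoc]

-- the same at the String list level
theorem pvJoinSnoc (sep y : String) (xs : List String) (h : xs ≠ []) :
    (PySem.Str.join sep (xs ++ [y])).toList
      = (PySem.Str.join sep xs).toList ++ sep.toList ++ y.toList := by
  simp only [PySem.Str.toList_join, List.map_append, List.map_cons, List.map_nil]
  exact pvJoinSnocL sep.toList y.toList (xs.map String.toList) (by simpa using h)

-- B's fold builds the flat parts list (cited library loop shape)
theorem pvPartsEq (zs : List (String × String)) (acc : List String) :
    zs.foldl (fun acc pc =>
        acc ++ [(if pvBody pc.1 && pvBody pc.2 then " " else "\n"), pvRender pc.2]) acc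
      = acc ++ zs.flatMap (fun pc =>
          [(if pvBody pc.1 && pvBody pc.2 then " " else "\n"), pvRender pc.2]) :=
  PySem.List.foldl_append_eq_flatMap _ zs acc

-- B's flat parts render to pvOutL
theorem pvZ (rest : List String) : ∀ l0 : String,
    (List.map String.toList (((l0 :: rest).zip rest).flatMap (fun pc =>
        [(if pvBody pc.1 && pvBody pc.2 then " " else "\n"), pvRender pc.2]))).flatten
      = pvOutL l0 rest := by
  induction rest with
  | nil => intro l0; simp [pvOutL]
  | cons c r ih =>
    intro l0
    simp only [List.zip_cons_cons, List.flatMap_cons, List.map_append, List.flatten_append,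
      List.map_cons, List.map_nil, List.flatten_cons, List.flatten_nil, pvOutL, ih]
    simp

-- A's run-grouped rendering joined with '\n' equals B's pairwise rendering
theorem pvM : ∀ (n : Nat) (l : String) (rest : List String), rest.length ≤ n →
    PySem.Chars.join ("\n".toList) (List.map String.toList (pvBGo (l :: rest)))
      = (pvRender l).toList ++ pvOutL l rest := by
  intro n
  induction n with
  | zero =>
    intro l rest hlen
    have hr : rest = [] := List.eq_nil_of_length_eq_zero (Nat.le_zero.mp hlen)
    subst hr
    by_cases hsp : pvIsSpecial (PySem.Str.strip l) = true
    · have hbl : pvBody l = false := by rw [pvBody_eq, hsp]; rfl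
      simp [pvBGo, hsp, pvOutL, pvRender, hbl, PySem.Chars.join_singleton]
    · have hbl : pvBody l = true := by
        rw [pvBody_eq, Bool.eq_false_iff.mpr hsp]; rfl
      simp [pvBGo, hsp, pvTakeBody, pvOutL, pvRender, hbl,
        PySem.Chars.join_singleton, PySem.Str.toList_join]
  | succ n ihn =>
    intro l rest hlen
    by_cases hsp : pvIsSpecial (PySem.Str.strip l) = true
    · have hbl : pvBody l = false := by rw [pvBody_eq, hsp]; rfl
      cases rest with
      | nil => simp [pvBGo, hsp, pvOutL, pvRender, hbl, PySem.Chars.join_singleton]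
      | cons c r =>
        obtain ⟨a, as, hEq⟩ : ∃ a as, pvBGo (c :: r) = a :: as := by
          cases h : pvBGo (c :: r) with
          | nil => exact absurd h (pvBGo_ne_nil c r)
          | cons a as => exact ⟨a, as, rfl⟩
        rw [show pvBGo (l :: c :: r) = l :: pvBGo (c :: r) from by
          rw [pvBGo]; simp [hsp]]
        rw [hEq, List.map_cons, List.map_cons, PySem.Chars.join_cons_cons,
          ← List.map_cons, ← hEq]
        rw [ihn c r (by simpa using Nat.le_of_succ_le_succ hlen)]
        simp [pvOutL, hbl, pvRender, List.append_assoc]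
    · have hbl : pvBody l = true := by
        rw [pvBody_eq, Bool.eq_false_iff.mpr hsp]; rfl
      have R : ∀ (rest' : List String), rest'.length ≤ n + 1 →
          ∀ (cur : List String) (p : String), cur ≠ [] → pvBody p = true →
          PySem.Chars.join ("\n".toList)
            (List.map String.toList
              (PySem.Str.join " " (cur ++ (pvTakeBody rest').1) :: pvBGo (pvTakeBody rest').2))
            = (PySem.Str.join " " cur).toList ++ pvOutL p rest' := by
        intro rest'
        induction rest' with
        | nil =>
          intro _ cur p hcur hp
          simp [pvTakeBody, pvBGo, pvOutL, PySem.Chars.join_singleton, PySem.Str.toList_join]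
        | cons c r ihr =>
          intro hlen' cur p hcur hp
          by_cases hc : pvIsSpecial (PySem.Str.strip c) = true
          · have hbc : pvBody c = false := by rw [pvBody_eq, hc]; rfl
            rw [show pvTakeBody (c :: r) = ([], c :: r) from by
              rw [pvTakeBody]; simp [hc]]
            obtain ⟨a, as, hEq⟩ : ∃ a as, pvBGo (c :: r) = a :: as := by
              cases h : pvBGo (c :: r) with
              | nil => exact absurd h (pvBGo_ne_nil c r)
              | cons a as => exact ⟨a, as, rfl⟩
            simp only [List.append_nil]
            rw [hEq, List.map_cons, List.map_cons, PySem.Chars.join_cons_cons,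
              ← List.map_cons, ← hEq]
            rw [ihn c r (by simp at hlen' ⊢; omega)]
            simp [pvOutL, hbc, hp, pvRender, List.append_assoc]
          · have hbc : pvBody c = true := by
              rw [pvBody_eq, Bool.eq_false_iff.mpr hc]; rfl
            rw [show pvTakeBody (c :: r)
                = (PySem.Str.strip c :: (pvTakeBody r).1, (pvTakeBody r).2) from by
              rw [pvTakeBody]; simp [hc]]
            rw [show cur ++ PySem.Str.strip c :: (pvTakeBody r).1
                = (cur ++ [PySem.Str.strip c]) ++ (pvTakeBody r).1 from by simp]
            rw [ihr (by simp at hlen' ⊢; omega) (cur ++ [PySem.Str.strip c]) c (by simp) hbc]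
            rw [pvJoinSnoc " " (PySem.Str.strip c) cur hcur]
            simp [pvOutL, hp, hbc, pvRender, List.append_assoc]
      rw [show pvBGo (l :: rest)
          = PySem.Str.join " " (PySem.Str.strip l :: (pvTakeBody rest).1)
              :: pvBGo (pvTakeBody rest).2 from by
        rw [pvBGo]; simp [hsp, pvTakeBody]]
      rw [show PySem.Str.strip l :: (pvTakeBody rest).1
          = [PySem.Str.strip l] ++ (pvTakeBody rest).1 from rfl]
      rw [R rest hlen [PySem.Str.strip l] l (by simp) hbl]
      simp [PySem.Str.toList_join, PySem.Chars.join_singleton, pvRender, hbl]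

-- ===== VERDICT (by name: the statement is the Claim_ definition above) =====
theorem preserve_intra_paragraph_linebreaks_py_spec : Claim_equal_preserve_intra_paragraph_linebreaks_py := by
  intro md_text _
  unfold Spec_preserve_intra_paragraph_linebreaks_py
  unfold preserve_intra_paragraph_linebreaks_py preserve_intra_paragraph_linebreaks_py_alt
  cases hls : PySem.Str.splitlines md_text with
  | nil => simp
  | cons l0 rest =>
    simp only [List.isEmpty_cons, Bool.false_eq_true, if_false, List.tail_cons, List.headD_cons]
    rw [show (let st := (l0 :: rest).foldl pvAStep ([], []);
          if st.2.isEmpty then st.1 else st.1 ++ [PySem.Str.join " " st.2])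
        = [] ++ pvBump [] (l0 :: rest) from pvFold_bump _ [] [],
        ← pvBGo_eq_bump, List.nil_append]
    rw [pvPartsEq]
    unfold PySem.Str.join
    apply congrArg String.ofList
    rw [pvJoin_nil]
    rw [pvM rest.length l0 rest le_rfl]
    simp only [List.map_append, List.flatten_append]
    rw [pvZ rest l0]
    simp
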